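-- pv_equiv track=rewrite | github.com/pypi-data/pypi-mirror-35 | packages/Kaiwen/kaiwen-0.3.tar.gz/kaiwen-0.3/kaiwen/english_format_checker.py | english_format_checker
-- ===== SOURCE A (Python) =====
-- def english_format_checker(string):
--     symbol_list = [',', '.', ';', ')', ']', '}', '?']
--     end_symbol_list = ['.', '?']
--     not_end_symbol_list = [i for i in symbol_list if i not in end_symbol_list]
--     single_list = list(string)
--
--     # Capitalize the first word of string
--     single_list[0] = single_list[0].upper()
--     single_list_length = len(single_list)
--     symbol_index_list = [i for i, x in enumerate(single_list) if x in symbol_list]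
--     index_count = 0
--     add_blank_index_list = []
--
--     # Add blank after symbols.
--     if single_list_length - 1 in symbol_index_list:
--         symbol_index_list.remove(single_list_length - 1)
--
--     for indexes in symbol_index_list:
--
--         if single_list[indexes+1] != ' ':
--             add_blank_index_list.append(indexes)
--
--     for indexes in add_blank_index_list:
--         index_count += 1
--         single_list.insert(indexes + index_count, ' ')
--
--     # Capitalize the first words after end symbols.
--     single_list_length = len(single_list)
--     end_symbol_index_list = [i for i, x in enumerate(single_list) if x in end_symbol_list]
--
--     if single_list_length - 1 in end_symbol_index_list:
--         end_symbol_index_list.remove(single_list_length - 1)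
--
--     for indexes in end_symbol_index_list:
--         single_list[indexes+2] = single_list[indexes+2].upper()
--
--     string = ''.join(single_list)
--
--     # Lower the first characters after not end symbols
--     single_list_length = len(single_list)
--     end_symbol_index_list = [i for i, x in enumerate(single_list) if x in not_end_symbol_list]
--
--     if single_list_length - 1 in end_symbol_index_list:
--         end_symbol_index_list.remove(single_list_length - 1)
--
--     for indexes in end_symbol_index_list:
--         single_list[indexes + 2] = single_list[indexes + 2].lower()
--
--     result_string = ''.join(single_list)
--
--     return result_string
-- ===== SOURCE B (Python) =====
-- def english_format_checker(string):
--     symbols = ",.;)]}?"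
--     enders = ".?"
--     n = len(string)
--     spaced = []
--     for i, c in enumerate(string):
--         if i == 0:
--             c = c.upper()
--         spaced.append(c)
--         if c in symbols and i + 1 < n and string[i + 1] != ' ':
--             spaced.append(' ')
--     out = []
--     for p, c in enumerate(spaced):
--         if p >= 2 and spaced[p - 2] in enders:
--             out.append(c.upper())
--         elif p >= 2 and spaced[p - 2] in symbols:
--             out.append(c.lower())
--         else:
--             out.append(c)
--     return ''.join(out)
-- ===== Notes on version B (the rewrite author's own statement) =====
-- stated objective: faster
-- what changed: A rebuilds index lists by scanning the whole string four times and shifts the list with repeated list.insert (quadratic); B is two linear passes: one builds the spaced copy with a one-character lookahead, one fixes the case of each character from the character two places back.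
import Mathlib
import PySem

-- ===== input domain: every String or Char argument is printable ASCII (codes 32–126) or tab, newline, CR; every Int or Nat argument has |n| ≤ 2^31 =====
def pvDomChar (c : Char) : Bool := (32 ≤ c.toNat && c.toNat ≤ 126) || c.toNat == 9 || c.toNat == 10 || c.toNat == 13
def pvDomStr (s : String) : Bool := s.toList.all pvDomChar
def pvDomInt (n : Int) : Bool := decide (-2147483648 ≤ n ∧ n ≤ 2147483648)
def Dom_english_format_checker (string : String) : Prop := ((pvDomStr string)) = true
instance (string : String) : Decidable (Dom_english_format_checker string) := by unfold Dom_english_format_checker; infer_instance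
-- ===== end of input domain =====

-- B replaces A's quadratic pipeline (repeated whole-list index scans and list.insert shifts)
-- with two linear passes; equivalence of the RETURN value is proved on Pre_ (A raises elsewhere).

-- ===== PORT A =====
def efcSymList : List Char := [',', '.', ';', ')', ']', '}', '?']
def efcEndList : List Char := ['.', '?']
-- not_end_symbol_list = [i for i in symbol_list if i not in end_symbol_list]
def efcNotEndList : List Char := efcSymList.filter (fun c => decide (c ∉ efcEndList))

-- [i for i, x in enumerate(sl) if x in S]
def efcIdxList (S : List Char) (sl : List Char) : List Int :=
  ((PySem.List.enumerate sl).filter (fun p => decide (p.2 ∈ S))).map (·.1)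

-- for indexes in idxs: index_count += 1; single_list.insert(indexes + index_count, ' ')
def efcInsertBlanks (sl : List Char) (idxs : List Int) : List Char :=
  (idxs.foldl (fun acc i => (PySem.List.insert acc.1 (i + (acc.2 + 1)) ' ', acc.2 + 1))
    (sl, (0 : Int))).1

-- for indexes in idxs: single_list[indexes+2] = f(single_list[indexes+2])
-- (pySetD/pyGetD are exact while indexes+2 is in range; out of range Python raises
--  IndexError — those inputs are excluded by Pre_)
def efcSetPass (f : Char → Char) (sl : List Char) (idxs : List Int) : List Char :=
  idxs.foldl (fun l i => PySem.List.pySetD l (i + 2) (f (PySem.List.pyGetD l (i + 2) ' '))) sl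

-- the blank-insertion block of A (symbol indices, drop the last index, keep those not
-- followed by a blank, insert)
def efcPass1 (sl : List Char) : List Char :=
  let n : Int := sl.length
  let sil := efcIdxList efcSymList sl
  let sil := if (n - 1) ∈ sil then sil.erase (n - 1) else sil
  let abil := sil.filter (fun i => PySem.List.pyGetD sl (i + 1) ' ' != ' ')
  efcInsertBlanks sl abil

-- A's uppercase block (end-symbol indices, drop the last index, set index+2)
def efcPass2 (sl2 : List Char) : List Char :=
  let n2 : Int := sl2.length
  let esil := efcIdxList efcEndList sl2
  let esil := if (n2 - 1) ∈ esil then esil.erase (n2 - 1) else esil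
  efcSetPass PySem.Chars.upperChar sl2 esil

-- A's lowercase block (not-end-symbol indices, drop the last index, set index+2)
def efcPass3 (sl3 : List Char) : List Char :=
  let n3 : Int := sl3.length
  let nsil := efcIdxList efcNotEndList sl3
  let nsil := if (n3 - 1) ∈ nsil then nsil.erase (n3 - 1) else nsil
  efcSetPass PySem.Chars.lowerChar sl3 nsil

def english_format_checker (string : String) : String :=
  -- single_list[0] = single_list[0].upper(): raises IndexError on ""; excluded by Pre_
  let sl : List Char :=
    match string.toList with
    | [] => []
    | c :: t => PySem.Chars.upperChar c :: t
  let sl2 := efcPass1 sl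
  let sl3 := efcPass2 sl2
  -- string = ''.join(single_list): reassigned and never used for the result
  let sl4 := efcPass3 sl3
  String.ofList sl4

-- ===== PORT B =====
-- first linear pass of Source B: uppercase the first character, copy, and append a blank
-- after a symbol whose next input character exists and is not a blank
def efcSpace (first : Bool) : List Char → List Char
  | [] => []
  | c :: rest =>
      let c' := if first then PySem.Chars.upperChar c else c
      if c' ∈ efcSymList ∧ rest ≠ [] ∧ rest.head? ≠ some ' ' then
        c' :: ' ' :: efcSpace false rest
      else
        c' :: efcSpace false rest

-- second linear pass of Source B: adjust case from the character two places back
def efcFix (M : List Char) : List Char :=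
  (PySem.List.enumerate M).map (fun pc =>
    if 2 ≤ pc.1 ∧ PySem.List.pyGetD M (pc.1 - 2) ' ' ∈ efcEndList then PySem.Chars.upperChar pc.2
    else if 2 ≤ pc.1 ∧ PySem.List.pyGetD M (pc.1 - 2) ' ' ∈ efcSymList then PySem.Chars.lowerChar pc.2
    else pc.2)

def english_format_checker_alt (string : String) : String :=
  String.ofList (efcFix (efcSpace true string.toList))

-- ===== PRECONDITION & SPEC =====
-- Pre_ excludes exactly the inputs on which A raises IndexError: the empty string
-- (single_list[0]) and strings ending in a symbol followed by a blank
-- (single_list[indexes+2] is past the end there).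
def Pre_english_format_checker (string : String) : Prop :=
  string.toList ≠ [] ∧
  ¬ (2 ≤ string.toList.length ∧
     string.toList.getD (string.toList.length - 2) ' ' ∈ efcSymList ∧
     string.toList.getLast? = some ' ')
instance (string : String) : Decidable (Pre_english_format_checker string) := by
  unfold Pre_english_format_checker; infer_instance
def pvWitness_english_format_checker : String := "hello,world.good"

def Spec_english_format_checker (string : String) (out : String) : Prop := out = english_format_checker_alt string
instance (string : String) (out : String) : Decidable (Spec_english_format_checker string out) := by unfold Spec_english_format_checker; infer_instance

-- ===== CLAIM (what is proved, stated in full; the proofs are below) =====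
def Claim_equal_english_format_checker : Prop := ∀ (string : String), Dom_english_format_checker string → Pre_english_format_checker string → Spec_english_format_checker string (english_format_checker string)
-- ===== LEMMAS AND PROOFS =====

-- Nat-valued spec of the index comprehension
def efcIdxN (S : List Char) : List Char → List Nat
  | [] => []
  | c :: l => (if c ∈ S then [0] else []) ++ (efcIdxN S l).map (· + 1)

-- triggering positions of the blank-insertion loop
def efcTrigIdx : List Char → List Nat
  | [] => []
  | [_] => []
  | c :: d :: t =>
      (if c ∈ efcSymList ∧ d ≠ ' ' then [0] else []) ++ (efcTrigIdx (d :: t)).map (· + 1)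

-- the spaced list, as a lookahead recursion
def efcInsS : List Char → List Char
  | [] => []
  | [c] => [c]
  | c :: d :: t =>
      if c ∈ efcSymList ∧ d ≠ ' ' then c :: ' ' :: efcInsS (d :: t)
      else c :: efcInsS (d :: t)

-- the case-fixing pass, as a mapIdx
def efcFixSpec (M : List Char) : List Char :=
  M.mapIdx (fun q c =>
    if 2 ≤ q ∧ M.getD (q - 2) ' ' ∈ efcEndList then PySem.Chars.upperChar c
    else if 2 ≤ q ∧ M.getD (q - 2) ' ' ∈ efcSymList then PySem.Chars.lowerChar c
    else c)

theorem efc_enumerate_shift {α : Type} (l : List α) (s : Int) :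
    PySem.List.enumerate l s = (PySem.List.enumerate l 0).map (fun p => (p.1 + s, p.2)) := by
  induction l generalizing s with
  | nil => simp [PySem.List.enumerate]
  | cons x l ih =>
    rw [PySem.List.enumerate_cons, PySem.List.enumerate_cons, ih (s+1), ih (0+1)]
    simp [List.map_map, Function.comp]
    intro a b _
    omega

theorem efcIdxList_eq (S : List Char) (sl : List Char) :
    efcIdxList S sl = (efcIdxN S sl).map (fun (k : Nat) => (k : Int)) := by
  have key : ∀ (l : List Char),
      List.map (fun (x : Int × Char) => x.1) (List.filter (fun (p : Int × Char) => decide (p.2 ∈ S)) (PySem.List.enumerate l 0))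
        = (efcIdxN S l).map (fun (k : Nat) => (k : Int)) := by
    intro l
    induction l with
    | nil => simp [efcIdxN, PySem.List.enumerate]
    | cons c l ih =>
      rw [efcIdxN, PySem.List.enumerate_cons, efc_enumerate_shift l (0+1), List.filter_cons]
      by_cases hc : c ∈ S
      · simp only [hc, decide_true, if_pos, List.map_cons, List.map_append]
        refine List.cons_eq_cons.mpr ⟨rfl, ?_⟩
        rw [List.filter_map, List.map_map]
        have h2 : List.map ((fun (x : Int × Char) => x.1) ∘ fun (p : Int × Char) => (p.1 + (0+1), p.2)) (List.filter ((fun (p : Int × Char) => decide (p.2 ∈ S)) ∘ fun (p : Int × Char) => (p.1 + (0+1), p.2)) (PySem.List.enumerate l 0))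
            = List.map (fun (x : Int) => x + 1) (List.map (fun (x : Int × Char) => x.1) (List.filter (fun (p : Int × Char) => decide (p.2 ∈ S)) (PySem.List.enumerate l 0))) := by
          rw [List.map_map]; rfl
        rw [h2, ih, List.map_map, List.map_map]
        apply List.map_congr_left; intro k _; simp
      · simp only [hc, decide_false, Bool.false_eq_true, if_false, List.nil_append]
        rw [List.filter_map, List.map_map]
        have h2 : List.map ((fun (x : Int × Char) => x.1) ∘ fun (p : Int × Char) => (p.1 + (0+1), p.2)) (List.filter ((fun (p : Int × Char) => decide (p.2 ∈ S)) ∘ fun (p : Int × Char) => (p.1 + (0+1), p.2)) (PySem.List.enumerate l 0))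
            = List.map (fun (x : Int) => x + 1) (List.map (fun (x : Int × Char) => x.1) (List.filter (fun (p : Int × Char) => decide (p.2 ∈ S)) (PySem.List.enumerate l 0))) := by
          rw [List.map_map]; rfl
        rw [h2, ih, List.map_map, List.map_map]
        apply List.map_congr_left; intro k _; simp
  exact key sl

theorem efcIdxN_mem (S : List Char) (l : List Char) (k : Nat) :
    k ∈ efcIdxN S l ↔ k < l.length ∧ l.getD k ' ' ∈ S := by
  induction l generalizing k with
  | nil => simp [efcIdxN]
  | cons c l ih =>
    rw [efcIdxN]
    rcases k with _ | k
    · by_cases hc : c ∈ S <;> simp [hc]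
    · by_cases hc : c ∈ S <;> simp [hc, ih]

theorem efcIdxN_pairwise (S : List Char) (l : List Char) :
    (efcIdxN S l).Pairwise (· < ·) := by
  induction l with
  | nil => simp [efcIdxN]
  | cons c l ih =>
    rw [efcIdxN]
    refine List.pairwise_append.mpr ⟨?_, ?_, ?_⟩
    · by_cases hc : c ∈ S <;> simp [hc]
    · exact List.pairwise_map.mpr (ih.imp (by omega))
    · intro a ha b hb
      by_cases hc : c ∈ S <;> simp [hc] at ha
      subst ha
      rcases List.mem_map.mp hb with ⟨x, _, rfl⟩
      omega

-- the insertion fold with an arbitrary starting count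
def efcFoldIns (l : List Char) (k : Int) (idxs : List Int) : List Char :=
  (idxs.foldl (fun acc i => (PySem.List.insert acc.1 (i + (acc.2 + 1)) ' ', acc.2 + 1)) (l, k)).1

theorem efc_insert_cons' (l : List Char) (i : Int) (hi : 0 ≤ i) (v a : Char) :
    PySem.List.insert (a :: l) (i + 1) v = a :: PySem.List.insert l i v := by
  have h0 : ¬ (i + 1 < 0) := by omega
  have h1 : ¬ (i < 0) := by omega
  simp [PySem.List.insert, PySem.List.sliceIndices, h0, h1]
  have hm : (min i (l.length : Int) + 1).toNat = (min i (l.length : Int)).toNat + 1 := by omega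
  rw [hm, List.take_succ_cons, List.drop_succ_cons]
  simp

theorem efcFoldIns_shift_count (idxs : List Int) (hall : ∀ i ∈ idxs, 0 ≤ i) (a : Char)
    (l : List Char) (k : Int) (hk : 0 ≤ k) :
    efcFoldIns (a :: l) (k + 1) idxs = a :: efcFoldIns l k idxs := by
  induction idxs generalizing a l k with
  | nil => simp [efcFoldIns]
  | cons i rest ih =>
    unfold efcFoldIns
    simp only [List.foldl_cons]
    have hi : 0 ≤ i := hall i (by simp)
    have h1 : i + (k + 1 + 1) = (i + (k + 1)) + 1 := by ring
    rw [h1, efc_insert_cons' _ _ (by omega)]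
    have := ih (fun j hj => hall j (by simp [hj])) a (PySem.List.insert l (i + (k + 1)) ' ') (k + 1) (by omega)
    unfold efcFoldIns at this
    simpa using this

theorem efcFoldIns_shift_idx (idxs : List Int) (hall : ∀ i ∈ idxs, 0 ≤ i) (a : Char)
    (l : List Char) (k : Int) (hk : 0 ≤ k) :
    efcFoldIns (a :: l) k (idxs.map (· + 1)) = a :: efcFoldIns l k idxs := by
  induction idxs generalizing a l k with
  | nil => simp [efcFoldIns]
  | cons i rest ih =>
    unfold efcFoldIns
    simp only [List.map_cons, List.foldl_cons]
    have hi : 0 ≤ i := hall i (by simp)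
    have h1 : i + 1 + (k + 1) = (i + (k + 1)) + 1 := by ring
    rw [h1, efc_insert_cons' _ _ (by omega)]
    have := ih (fun j hj => hall j (by simp [hj])) a (PySem.List.insert l (i + (k + 1)) ' ') (k + 1) (by omega)
    unfold efcFoldIns at this
    simpa using this

theorem efc_map_cast_succ (X : List Nat) :
    (X.map (· + 1)).map (fun (k : Nat) => (k : Int))
      = (X.map (fun (k : Nat) => (k : Int))).map (· + 1) := by
  rw [List.map_map, List.map_map]
  apply List.map_congr_left
  intro k _
  simp

theorem efc_cast_nonneg (X : List Nat) : ∀ i ∈ X.map (fun (k : Nat) => (k : Int)), 0 ≤ i := by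
  intro i hi
  rcases List.mem_map.mp hi with ⟨x, _, rfl⟩
  exact Int.natCast_nonneg x

theorem efcInsertBlanks_eq (l : List Char) :
    efcInsertBlanks l ((efcTrigIdx l).map (fun (k : Nat) => (k : Int))) = efcInsS l := by
  have key : ∀ l, efcFoldIns l 0 ((efcTrigIdx l).map (fun (k : Nat) => (k : Int))) = efcInsS l := by
    intro l
    induction l using efcInsS.induct with
    | case1 => simp [efcFoldIns, efcTrigIdx, efcInsS]
    | case2 c => simp [efcFoldIns, efcTrigIdx, efcInsS]
    | case3 c d t h ih =>
      rw [efcTrigIdx, efcInsS]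
      simp only [if_pos h, List.map_append, List.map_cons, List.map_nil, List.singleton_append]
      rw [efc_map_cast_succ]
      unfold efcFoldIns
      simp only [List.foldl_cons, Nat.cast_zero]
      have h1 : (0 : Int) + (0 + 1) = 0 + 1 := by ring
      rw [h1, efc_insert_cons' _ _ le_rfl, PySem.List.insert_zero]
      have hs2 := efcFoldIns_shift_idx ((efcTrigIdx (d :: t)).map (fun (k : Nat) => (k : Int)))
        (efc_cast_nonneg _) c (' ' :: d :: t) (0 + 1) (by omega)
      unfold efcFoldIns at hs2
      rw [hs2]
      have hs1 := efcFoldIns_shift_count ((efcTrigIdx (d :: t)).map (fun (k : Nat) => (k : Int)))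
        (efc_cast_nonneg _) ' ' (d :: t) 0 le_rfl
      unfold efcFoldIns at hs1
      rw [hs1]
      unfold efcFoldIns at ih
      rw [ih]
    | case4 c d t h ih =>
      rw [efcTrigIdx, efcInsS]
      simp only [if_neg h, List.map_append, List.map_nil, List.nil_append]
      rw [efc_map_cast_succ]
      have hs2 := efcFoldIns_shift_idx ((efcTrigIdx (d :: t)).map (fun (k : Nat) => (k : Int)))
        (efc_cast_nonneg _) c (d :: t) 0 le_rfl
      unfold efcFoldIns at hs2 ⊢
      rw [hs2]
      unfold efcFoldIns at ih
      rw [ih]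
  have := key l
  unfold efcFoldIns at this
  unfold efcInsertBlanks
  simpa using this

theorem efc_trigN (l : List Char) :
    ((if (l.length - 1) ∈ efcIdxN efcSymList l then (efcIdxN efcSymList l).erase (l.length - 1)
      else efcIdxN efcSymList l).filter (fun k => l.getD (k + 1) ' ' != ' ')) = efcTrigIdx l := by
  induction l using efcTrigIdx.induct with
  | case1 => simp [efcIdxN, efcTrigIdx]
  | case2 c => by_cases hc : c ∈ efcSymList <;> simp [efcIdxN, efcTrigIdx, hc]
  | case3 c d t ih =>
    rw [efcTrigIdx]
    rw [show efcIdxN efcSymList (c :: d :: t)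
        = (if c ∈ efcSymList then [0] else []) ++ (efcIdxN efcSymList (d :: t)).map (· + 1) from rfl]
    have hlen : (c :: d :: t).length - 1 = t.length + 1 := by simp
    rw [hlen]
    have hlen2 : (d :: t).length - 1 = t.length := by simp
    rw [hlen2] at ih
    set Y := efcIdxN efcSymList (d :: t) with hY
    have hmem : ((t.length + 1) ∈ (if c ∈ efcSymList then [0] else []) ++ Y.map (· + 1))
        ↔ t.length ∈ Y := by
      by_cases hc : c ∈ efcSymList <;> simp [hc]
    have hpred : ∀ k : Nat, ((c :: d :: t).getD (k + 1 + 1) ' ' != ' ') = ((d :: t).getD (k + 1) ' ' != ' ') := by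
      intro k; rfl
    by_cases hm : t.length ∈ Y
    · rw [if_pos (hmem.mpr hm)]
      have herase : ((if c ∈ efcSymList then [0] else []) ++ Y.map (· + 1)).erase (t.length + 1)
          = (if c ∈ efcSymList then [0] else []) ++ (Y.erase t.length).map (· + 1) := by
        rw [List.map_erase (fun a b hab => by simpa using hab : Function.Injective (· + 1 : Nat → Nat))]
        by_cases hc : c ∈ efcSymList
        · simp only [hc, if_true, List.singleton_append]
          rw [List.erase_cons_tail (by simp)]
        · simp [hc]
      rw [herase, List.filter_append, List.filter_map]
      rw [if_pos hm] at ih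
      have hfm : List.filter ((fun k => (c :: d :: t).getD (k + 1) ' ' != ' ') ∘ (· + 1)) (Y.erase t.length)
          = List.filter (fun k => (d :: t).getD (k + 1) ' ' != ' ') (Y.erase t.length) := by
        apply List.filter_congr
        intro k _
        exact hpred k
      rw [hfm, ih]
      congr 1
      by_cases hc : c ∈ efcSymList
      · simp only [hc, if_true, List.filter_cons, true_and]
        by_cases hd : d = ' ' <;> simp [hd]
      · simp [hc]
    · rw [if_neg (fun hx => hm (hmem.mp hx))]
      rw [List.filter_append, List.filter_map]
      rw [if_neg hm] at ih
      have hfm : List.filter ((fun k => (c :: d :: t).getD (k + 1) ' ' != ' ') ∘ (· + 1)) Y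
          = List.filter (fun k => (d :: t).getD (k + 1) ' ' != ' ') Y := by
        apply List.filter_congr
        intro k _
        exact hpred k
      rw [hfm, ih]
      congr 1
      by_cases hc : c ∈ efcSymList
      · simp only [hc, if_true, List.filter_cons, true_and]
        by_cases hd : d = ' ' <;> simp [hd]
      · simp [hc]

theorem efcTrigIdx_eq (l : List Char) :
    ((if ((l.length : Int) - 1) ∈ efcIdxList efcSymList l then
        (efcIdxList efcSymList l).erase ((l.length : Int) - 1)
      else efcIdxList efcSymList l).filter
        (fun i => PySem.List.pyGetD l (i + 1) ' ' != ' '))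
      = (efcTrigIdx l).map (fun (k : Nat) => (k : Int)) := by
  rcases l with _ | ⟨c, t⟩
  · simp [efcIdxList, efcTrigIdx, PySem.List.enumerate]
  · set l := c :: t with hl
    have hn : 1 ≤ l.length := by simp [hl]
    rw [efcIdxList_eq]
    have hcast : ((l.length : Int) - 1) = ((l.length - 1 : Nat) : Int) := by
      push_cast [hn]; omega
    rw [hcast]
    have hmem : (((l.length - 1 : Nat) : Int) ∈ (efcIdxN efcSymList l).map (fun (k : Nat) => (k : Int)))
        ↔ (l.length - 1) ∈ efcIdxN efcSymList l := by
      constructor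
      · intro hx
        rcases List.mem_map.mp hx with ⟨x, hx1, hx2⟩
        have hxx : x = l.length - 1 := by exact_mod_cast hx2
        rwa [hxx] at hx1
      · intro hx
        exact List.mem_map.mpr ⟨_, hx, rfl⟩
    have herase : ((efcIdxN efcSymList l).map (fun (k : Nat) => (k : Int))).erase ((l.length - 1 : Nat) : Int)
        = ((efcIdxN efcSymList l).erase (l.length - 1)).map (fun (k : Nat) => (k : Int)) := by
      rw [List.map_erase (fun a b hab => by exact_mod_cast hab)]
    have hfilter : ∀ (X : List Nat),
        (X.map (fun (k : Nat) => (k : Int))).filter (fun i => PySem.List.pyGetD l (i + 1) ' ' != ' ')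
          = (X.filter (fun k => l.getD (k + 1) ' ' != ' ')).map (fun (k : Nat) => (k : Int)) := by
      intro X
      rw [List.filter_map]
      congr 1
      apply List.filter_congr
      intro k _
      have h1 : ((k : Int) + 1) = ((k + 1 : Nat) : Int) := by push_cast; ring
      simp only [Function.comp_apply]
      rw [h1, PySem.List.pyGetD_natCast]
    by_cases hm : (l.length - 1) ∈ efcIdxN efcSymList l
    · rw [if_pos (hmem.mpr hm), herase, hfilter, ← efc_trigN l, if_pos hm]
    · rw [if_neg (fun hx => hm (hmem.mp hx)), hfilter, ← efc_trigN l, if_neg hm]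

theorem efcInsS_length (l : List Char) : l.length ≤ (efcInsS l).length := by
  induction l using efcInsS.induct with
  | case1 => simp [efcInsS]
  | case2 c => simp [efcInsS]
  | case3 c d t h ih => rw [efcInsS, if_pos h]; simp at ih ⊢; omega
  | case4 c d t h ih => rw [efcInsS, if_neg h]; simp at ih ⊢; omega

theorem efc_bad_cons (c d : Char) (t : List Char)
    (h : 2 ≤ (d :: t).length ∧ (d :: t).getD ((d :: t).length - 2) ' ' ∈ efcSymList ∧
         (d :: t).getLast? = some ' ') :
    2 ≤ (c :: d :: t).length ∧ (c :: d :: t).getD ((c :: d :: t).length - 2) ' ' ∈ efcSymList ∧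
      (c :: d :: t).getLast? = some ' ' := by
  rcases h with ⟨h1, h2, h3⟩
  have ht1 : 1 ≤ t.length := by simpa using h1
  refine ⟨by simp, ?_, by rw [List.getLast?_cons_cons]; exact h3⟩
  have hidx : (c :: d :: t).length - 2 = ((d :: t).length - 2) + 1 := by simp; omega
  rw [hidx, List.getD_cons_succ]
  exact h2

theorem efcInsS_no_sym (l : List Char)
    (h2 : 2 ≤ (efcInsS l).length)
    (hs : (efcInsS l).getD ((efcInsS l).length - 2) ' ' ∈ efcSymList) :
    2 ≤ l.length ∧ l.getD (l.length - 2) ' ' ∈ efcSymList ∧ l.getLast? = some ' ' := by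
  induction l using efcInsS.induct with
  | case1 => simp [efcInsS] at h2
  | case2 c => simp [efcInsS] at h2
  | case3 c d t h ih =>
    rw [efcInsS, if_pos h] at hs
    have hElen : 1 ≤ (efcInsS (d :: t)).length := by
      have := efcInsS_length (d :: t); simp at this ⊢; omega
    by_cases hE2 : 2 ≤ (efcInsS (d :: t)).length
    · have hidx : (c :: ' ' :: efcInsS (d :: t)).length - 2
          = ((efcInsS (d :: t)).length - 2) + 1 + 1 := by simp; omega
      rw [hidx, List.getD_cons_succ, List.getD_cons_succ] at hs
      exact efc_bad_cons c d t (ih hE2 hs)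
    · have hE1 : (efcInsS (d :: t)).length = 1 := by omega
      have hidx : (c :: ' ' :: efcInsS (d :: t)).length - 2 = 1 := by simp; omega
      rw [hidx, List.getD_cons_succ, List.getD_cons_zero] at hs
      exact absurd hs (by decide)
  | case4 c d t h ih =>
    rw [efcInsS, if_neg h] at hs h2
    have hElen : 1 ≤ (efcInsS (d :: t)).length := by
      have := efcInsS_length (d :: t); simp at this ⊢; omega
    by_cases hE2 : 2 ≤ (efcInsS (d :: t)).length
    · have hidx : (c :: efcInsS (d :: t)).length - 2
          = ((efcInsS (d :: t)).length - 2) + 1 := by simp only [List.length_cons]; omega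
      rw [hidx, List.getD_cons_succ] at hs
      exact efc_bad_cons c d t (ih hE2 hs)
    · have hE1 : (efcInsS (d :: t)).length = 1 := by omega
      have hdt : (d :: t).length = 1 := by
        have hle := efcInsS_length (d :: t)
        simp only [List.length_cons] at hle ⊢
        omega
      have ht : t = [] := by simpa using hdt
      subst ht
      have hd : d = ' ' := by
        by_contra hd
        have hcs : c ∈ efcSymList := by
          have hidx : (c :: efcInsS [d]).length - 2 = 0 := by
            rw [show efcInsS [d] = [d] from rfl]; rfl
          rwa [hidx, List.getD_cons_zero] at hs
        exact h ⟨hcs, hd⟩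
      subst hd
      have hidx : (c :: efcInsS [' ']).length - 2 = 0 := by
        rw [show efcInsS [' '] = [' '] from rfl]; rfl
      rw [hidx, List.getD_cons_zero] at hs
      exact ⟨by simp, by simpa using hs, rfl⟩

theorem efc_upperChar_mem (c : Char) (S : List Char) (hS : S = efcSymList ∨ S = efcEndList ∨ S = efcNotEndList) :
    PySem.Chars.upperChar c ∈ S ↔ c ∈ S := by
  have hboth : ∀ x ∈ S, ¬ (65 ≤ x.toNat ∧ x.toNat ≤ 90) ∧ ¬ (97 ≤ x.toNat ∧ x.toNat ≤ 122) := by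
    rcases hS with rfl | rfl | rfl <;> intro x hx <;>
      simp [efcSymList, efcEndList, efcNotEndList] at hx
    · rcases hx with rfl | rfl | rfl | rfl | rfl | rfl | rfl <;> exact ⟨by decide, by decide⟩
    · rcases hx with rfl | rfl <;> exact ⟨by decide, by decide⟩
    · rcases hx with rfl | rfl | rfl | rfl | rfl <;> exact ⟨by decide, by decide⟩
  have hup : ∀ x ∈ S, ¬ (65 ≤ x.toNat ∧ x.toNat ≤ 90) := fun x hx => (hboth x hx).1
  have hlow : ∀ x ∈ S, ¬ (97 ≤ x.toNat ∧ x.toNat ≤ 122) := fun x hx => (hboth x hx).2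
  unfold PySem.Chars.upperChar PySem.Chars.islower
  by_cases hlo : ('a' ≤ c ∧ c ≤ 'z')
  · have h97 : 97 ≤ c.toNat ∧ c.toNat ≤ 122 := ⟨hlo.1, hlo.2⟩
    have hval : (c.toNat - 32).isValidChar := by left; omega
    have htn : (Char.ofNat (c.toNat - 32)).toNat = c.toNat - 32 := by
      simp [Char.ofNat, hval]
    have hcond : (decide ('a' ≤ c) && decide (c ≤ 'z')) = true := by
      simp only [Bool.and_eq_true, decide_eq_true_eq]; exact hlo
    rw [if_pos hcond]
    constructor
    · intro hx
      exact absurd ⟨by omega, by rw [htn]; omega⟩ (hup _ hx)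
    · intro hx
      exact absurd h97 (hlow _ hx)
  · have hcond : ¬ ((decide ('a' ≤ c) && decide (c ≤ 'z')) = true) := by
      simp only [Bool.and_eq_true, decide_eq_true_eq]; exact hlo
    rw [if_neg hcond]

theorem efc_notEnd_mem (c : Char) :
    c ∈ efcNotEndList ↔ c ∈ efcSymList ∧ c ∉ efcEndList := by
  simp [efcNotEndList, List.mem_filter]

theorem efcSetPassN_eq (f : Char → Char) (M : List Char) (idxs : List Nat)
    (hnd : idxs.Nodup) (hrange : ∀ i ∈ idxs, i + 2 < M.length) :
    idxs.foldl (fun l i => l.set (i + 2) (f (l.getD (i + 2) ' '))) M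
      = M.mapIdx (fun q c => if 2 ≤ q ∧ (q - 2) ∈ idxs then f c else c) := by
  induction idxs generalizing M with
  | nil =>
    simp only [List.foldl_nil, List.not_mem_nil, and_false, if_false]
    apply List.ext_getElem (by simp)
    intro q h1 h2
    simp
  | cons i rest ih =>
    simp only [List.foldl_cons]
    have hlen : (M.set (i + 2) (f (M.getD (i + 2) ' '))).length = M.length := by simp
    rw [ih _ (List.nodup_cons.mp hnd).2 (fun j hj => by rw [hlen]; exact hrange j (by simp [hj]))]
    apply List.ext_getElem (by simp)
    intro q h1 h2
    have hiq : i + 2 < M.length := hrange i (by simp)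
    have hgd : M.getD (i + 2) ' ' = M[i + 2] := List.getD_eq_getElem M ' ' hiq
    have hq : q < M.length := by simpa using h2
    simp only [List.getElem_mapIdx, List.getElem_set]
    by_cases hqi : i + 2 = q
    · subst hqi
      have hni : i ∉ rest := (List.nodup_cons.mp hnd).1
      have hc1 : ¬ (2 ≤ i + 2 ∧ (i + 2) - 2 ∈ rest) := by
        rintro ⟨_, hmem⟩
        simp at hmem
        exact hni hmem
      have hc2 : (2 ≤ i + 2 ∧ (i + 2) - 2 ∈ (i :: rest)) := ⟨by omega, by simp⟩
      rw [if_pos rfl, if_neg hc1, if_pos hc2, hgd]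
    · rw [if_neg hqi]
      by_cases h2q : 2 ≤ q
      · have hiff : (q - 2) ∈ rest ↔ (q - 2) ∈ (i :: rest) := by
          constructor
          · intro hx; exact List.mem_cons_of_mem _ hx
          · intro hx
            rcases List.mem_cons.mp hx with hx1 | hx2
            · omega
            · exact hx2
        by_cases hmem : (q - 2) ∈ rest
        · rw [if_pos ⟨h2q, hmem⟩, if_pos ⟨h2q, hiff.mp hmem⟩]
        · rw [if_neg (by rintro ⟨_, hx⟩; exact hmem hx),
              if_neg (by rintro ⟨_, hx⟩; exact hmem (hiff.mpr hx))]
      · rw [if_neg (by rintro ⟨hx, _⟩; exact h2q hx), if_neg (by rintro ⟨hx, _⟩; exact h2q hx)]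

theorem efcSetPass_eq (f : Char → Char) (M : List Char) (idxs : List Nat)
    (hnd : idxs.Nodup) (hrange : ∀ i ∈ idxs, i + 2 < M.length) :
    efcSetPass f M (idxs.map (fun (k : Nat) => (k : Int)))
      = M.mapIdx (fun q c => if 2 ≤ q ∧ (q - 2) ∈ idxs then f c else c) := by
  have hcast : ∀ (idxs : List Nat) (M : List Char),
      efcSetPass f M (idxs.map (fun (k : Nat) => (k : Int)))
        = idxs.foldl (fun l i => l.set (i + 2) (f (l.getD (i + 2) ' '))) M := by
    intro idxs
    induction idxs with
    | nil => intro M; rfl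
    | cons i rest ih =>
      intro M
      unfold efcSetPass at ih ⊢
      simp only [List.map_cons, List.foldl_cons]
      have h1 : ((i : Int) + 2) = ((i + 2 : Nat) : Int) := by push_cast; ring
      rw [h1, PySem.List.pySetD_natCast, PySem.List.pyGetD_natCast]
      exact ih _
  rw [hcast]
  exact efcSetPassN_eq f M idxs hnd hrange

theorem efcFix_eq (M : List Char) : efcFix M = efcFixSpec M := by
  unfold efcFix efcFixSpec
  apply List.ext_getElem (by simp [PySem.List.length_enumerate])
  intro q h1 h2
  have hq : q < M.length := by simpa using h2
  simp only [List.getElem_map, List.getElem_mapIdx, PySem.List.getElem_enumerate]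
  by_cases h2q : 2 ≤ q
  · have hcast : ((0 : Int) + (q : Int)) - 2 = ((q - 2 : Nat) : Int) := by push_cast; omega
    simp only [hcast, PySem.List.pyGetD_natCast]
    have hiff1 : (2 ≤ (0 : Int) + (q : Int) ∧ M.getD (q - 2) ' ' ∈ efcEndList)
        ↔ (2 ≤ q ∧ M.getD (q - 2) ' ' ∈ efcEndList) := by
      constructor <;> rintro ⟨a, b⟩ <;> exact ⟨by omega, b⟩
    have hiff2 : (2 ≤ (0 : Int) + (q : Int) ∧ M.getD (q - 2) ' ' ∈ efcSymList)
        ↔ (2 ≤ q ∧ M.getD (q - 2) ' ' ∈ efcSymList) := by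
      constructor <;> rintro ⟨a, b⟩ <;> exact ⟨by omega, b⟩
    rw [if_congr hiff1 rfl (if_congr hiff2 rfl rfl)]
  · have hne : ¬ (2 ≤ (0 : Int) + (q : Int)) := by omega
    rw [if_neg (fun hx => hne hx.1), if_neg (fun hx => hne hx.1),
        if_neg (fun hx => h2q hx.1), if_neg (fun hx => h2q hx.1)]

theorem efcSpace_false_eq (l : List Char) : efcSpace false l = efcInsS l := by
  induction l using efcInsS.induct with
  | case1 => rfl
  | case2 c => simp [efcSpace, efcInsS]
  | case3 c d t h ih =>
    rw [efcSpace, efcInsS, if_pos h, ih]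
    rw [if_pos (by exact ⟨h.1, by simp, by simpa using h.2⟩)]
    simp
  | case4 c d t h ih =>
    rw [efcSpace, efcInsS, if_neg h, ih]
    rw [if_neg (by rintro ⟨h1, h2, h3⟩; exact h ⟨h1, by simpa using h3⟩)]
    simp

theorem efcSpace_eq (c : Char) (t : List Char) :
    efcSpace true (c :: t) = efcInsS (PySem.Chars.upperChar c :: t) := by
  rcases t with _ | ⟨d, t⟩
  · simp [efcSpace, efcInsS]
  · rw [efcSpace, efcInsS, efcSpace_false_eq]
    by_cases h : PySem.Chars.upperChar c ∈ efcSymList ∧ d ≠ ' '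
    · rw [if_pos h, if_pos (by exact ⟨h.1, by simp, by simpa using h.2⟩)]
      simp
    · rw [if_neg h, if_neg (by rintro ⟨h1, h2, h3⟩; exact h ⟨h1, by simpa using h3⟩)]
      simp

-- Nat-level "drop the last index" list
def efcDropN (S : List Char) (l : List Char) : List Nat :=
  if (l.length - 1) ∈ efcIdxN S l then (efcIdxN S l).erase (l.length - 1) else efcIdxN S l

theorem efc_dropInt_eq (S : List Char) (l : List Char) :
    (if ((l.length : Int) - 1) ∈ efcIdxList S l then
       (efcIdxList S l).erase ((l.length : Int) - 1)
     else efcIdxList S l) = (efcDropN S l).map (fun (k : Nat) => (k : Int)) := by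
  rcases l with _ | ⟨c, t⟩
  · simp [efcIdxList, efcIdxN, efcDropN, PySem.List.enumerate]
  · set l := c :: t with hl
    have hn : 1 ≤ l.length := by simp [hl]
    rw [efcIdxList_eq]
    have hcast : ((l.length : Int) - 1) = ((l.length - 1 : Nat) : Int) := by
      push_cast [hn]; omega
    rw [hcast]
    have hmem : (((l.length - 1 : Nat) : Int) ∈ (efcIdxN S l).map (fun (k : Nat) => (k : Int)))
        ↔ (l.length - 1) ∈ efcIdxN S l := by
      constructor
      · intro hx
        rcases List.mem_map.mp hx with ⟨x, hx1, hx2⟩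
        have hxx : x = l.length - 1 := by exact_mod_cast hx2
        rwa [hxx] at hx1
      · intro hx
        exact List.mem_map.mpr ⟨_, hx, rfl⟩
    unfold efcDropN
    by_cases hm : (l.length - 1) ∈ efcIdxN S l
    · rw [if_pos (hmem.mpr hm), if_pos hm,
          List.map_erase (fun a b hab => by exact_mod_cast hab)]
    · rw [if_neg (fun hx => hm (hmem.mp hx)), if_neg hm]

theorem efcDropN_nodup (S : List Char) (l : List Char) : (efcDropN S l).Nodup := by
  have hnd : (efcIdxN S l).Nodup := (efcIdxN_pairwise S l).nodup
  unfold efcDropN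
  by_cases hm : (l.length - 1) ∈ efcIdxN S l
  · rw [if_pos hm]; exact hnd.erase _
  · rw [if_neg hm]; exact hnd

theorem efcDropN_mem (S : List Char) (l : List Char) (k : Nat) :
    k ∈ efcDropN S l ↔ (k < l.length ∧ l.getD k ' ' ∈ S ∧ k ≠ l.length - 1) := by
  have hnd : (efcIdxN S l).Nodup := (efcIdxN_pairwise S l).nodup
  unfold efcDropN
  by_cases hm : (l.length - 1) ∈ efcIdxN S l
  · rw [if_pos hm, hnd.mem_erase_iff]
    rw [efcIdxN_mem]
    constructor
    · rintro ⟨hne, h1, h2⟩; exact ⟨h1, h2, hne⟩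
    · rintro ⟨h1, h2, hne⟩; exact ⟨hne, h1, h2⟩
  · rw [if_neg hm, efcIdxN_mem]
    constructor
    · rintro ⟨h1, h2⟩
      refine ⟨h1, h2, ?_⟩
      intro hk
      exact hm (hk ▸ (efcIdxN_mem S l k).mpr ⟨h1, h2⟩)
    · rintro ⟨h1, h2, _⟩; exact ⟨h1, h2⟩

theorem efcDropN_range (S : List Char) (l : List Char)
    (hsub : ∀ x ∈ S, x ∈ efcSymList)
    (hM : ¬ (2 ≤ l.length ∧ l.getD (l.length - 2) ' ' ∈ efcSymList)) :
    ∀ i ∈ efcDropN S l, i + 2 < l.length := by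
  intro i hi
  rcases (efcDropN_mem S l i).mp hi with ⟨h1, h2, h3⟩
  by_cases hi2 : i = l.length - 2
  · exfalso
    apply hM
    constructor
    · omega
    · rw [← hi2]; exact hsub _ h2
  · omega

-- A's two set passes compute efcFixSpec, provided no symbol sits at position length-2
theorem efc_getD_mapIdx (l : List Char) (f : Nat → Char → Char) (q : Nat) (d : Char)
    (hq : q < l.length) : (l.mapIdx f).getD q d = f q (l.getD q d) := by
  rw [List.getD_eq_getElem _ _ (by simpa using hq), List.getElem_mapIdx,
      List.getD_eq_getElem _ _ hq]

theorem efc_pass3_fix (M N : List Char)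
    (hlen : N.length = M.length)
    (hNmem : ∀ q, q < M.length → ∀ S, (S = efcSymList ∨ S = efcEndList ∨ S = efcNotEndList) →
      (N.getD q ' ' ∈ S ↔ M.getD q ' ' ∈ S))
    (hNval : ∀ q, q < M.length →
      N.getD q ' ' = if 2 ≤ q ∧ M.getD (q - 2) ' ' ∈ efcEndList then
        PySem.Chars.upperChar (M.getD q ' ') else M.getD q ' ')
    (hM : ¬ (2 ≤ M.length ∧ M.getD (M.length - 2) ' ' ∈ efcSymList)) :
    efcPass3 N = efcFixSpec M := by
  have hsubNE : ∀ x ∈ efcNotEndList, x ∈ efcSymList := fun x hx => ((efc_notEnd_mem x).mp hx).1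
  have hMN : ¬ (2 ≤ N.length ∧ N.getD (N.length - 2) ' ' ∈ efcSymList) := by
    rintro ⟨ha, hb⟩
    apply hM
    rw [hlen] at ha hb
    refine ⟨ha, ?_⟩
    exact (hNmem _ (by omega) efcSymList (Or.inl rfl)).mp hb
  unfold efcPass3
  dsimp only
  rw [efc_dropInt_eq]
  rw [efcSetPass_eq _ _ _ (efcDropN_nodup _ _) (efcDropN_range _ _ hsubNE hMN)]
  have hDN : ∀ k, k ∈ efcDropN efcNotEndList N ↔
      (k < M.length ∧ M.getD k ' ' ∈ efcNotEndList ∧ k ≠ M.length - 1) := by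
    intro k
    rw [efcDropN_mem, hlen]
    constructor
    · rintro ⟨h1, h2, h3⟩
      exact ⟨h1, (hNmem k h1 efcNotEndList (Or.inr (Or.inr rfl))).mp h2, h3⟩
    · rintro ⟨h1, h2, h3⟩
      exact ⟨h1, (hNmem k h1 efcNotEndList (Or.inr (Or.inr rfl))).mpr h2, h3⟩
  apply List.ext_getElem (by unfold efcFixSpec; simp [hlen])
  intro q h1 h2
  have hqM : q < M.length := by
    have : q < N.length := by simpa using h1
    omega
  have hqN : q < N.length := by omega
  unfold efcFixSpec
  simp only [List.getElem_mapIdx]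
  rw [← List.getD_eq_getElem N ' ' hqN, ← List.getD_eq_getElem M ' ' hqM]
  by_cases h2q : 2 ≤ q
  · have hne1 : q - 2 ≠ M.length - 1 := by omega
    by_cases he : M.getD (q - 2) ' ' ∈ efcEndList
    · have hnne : M.getD (q - 2) ' ' ∉ efcNotEndList := by
        intro hx
        exact ((efc_notEnd_mem _).mp hx).2 he
      rw [if_neg (by rintro ⟨_, hx⟩; exact hnne ((hDN _).mp hx).2.1),
          hNval q hqM, if_pos ⟨h2q, he⟩, if_pos ⟨h2q, he⟩]
    · by_cases hs : M.getD (q - 2) ' ' ∈ efcSymList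
      · have hnne : M.getD (q - 2) ' ' ∈ efcNotEndList := (efc_notEnd_mem _).mpr ⟨hs, he⟩
        have hval : N.getD q ' ' = M.getD q ' ' ∨ N.getD q ' ' ∈ efcSymList → True := fun _ => trivial
        rw [if_pos ⟨h2q, (hDN _).mpr ⟨by omega, hnne, hne1⟩⟩,
            if_neg (by rintro ⟨_, hx⟩; exact he hx), if_pos ⟨h2q, hs⟩]
        -- lowerChar (N.getD q ' ') = lowerChar (M.getD q ' '): need N.getD q = M.getD q?
        -- not in general: N.getD q may be uppercased when M.getD (q-2) ∈ endList; but here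
        -- M.getD (q-2) ∈ notEndList, so the upper pass did not touch q:
        rw [hNval q hqM, if_neg (by rintro ⟨_, hx⟩; exact he hx)]
      · have hnne : M.getD (q - 2) ' ' ∉ efcNotEndList := by
          intro hx
          exact hs ((efc_notEnd_mem _).mp hx).1
        rw [if_neg (by rintro ⟨_, hx⟩; exact hnne ((hDN _).mp hx).2.1),
            hNval q hqM, if_neg (by rintro ⟨_, hx⟩; exact he hx),
            if_neg (by rintro ⟨_, hx⟩; exact he hx), if_neg (by rintro ⟨_, hx⟩; exact hs hx)]
  · rw [if_neg (by rintro ⟨hx, _⟩; exact h2q hx), hNval q hqM,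
        if_neg (by rintro ⟨hx, _⟩; exact h2q hx), if_neg (by rintro ⟨hx, _⟩; exact h2q hx),
        if_neg (by rintro ⟨hx, _⟩; exact h2q hx)]

theorem efc_passes_eq (M : List Char)
    (hM : ¬ (2 ≤ M.length ∧ M.getD (M.length - 2) ' ' ∈ efcSymList)) :
    efcPass3 (efcPass2 M) = efcFixSpec M := by
  have hsubE : ∀ x ∈ efcEndList, x ∈ efcSymList := by
    intro x hx
    simp [efcEndList] at hx
    rcases hx with rfl | rfl <;> simp [efcSymList]
  have hpass2 : efcPass2 M = M.mapIdx (fun q c =>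
      if 2 ≤ q ∧ (q - 2) ∈ efcDropN efcEndList M then PySem.Chars.upperChar c else c) := by
    unfold efcPass2
    dsimp only
    rw [efc_dropInt_eq]
    exact efcSetPass_eq _ _ _ (efcDropN_nodup _ _) (efcDropN_range _ _ hsubE hM)
  rw [hpass2]
  set N := M.mapIdx (fun q c =>
      if 2 ≤ q ∧ (q - 2) ∈ efcDropN efcEndList M then PySem.Chars.upperChar c else c) with hN
  have hNg : ∀ q, q < M.length → N.getD q ' '
      = if 2 ≤ q ∧ (q - 2) ∈ efcDropN efcEndList M then
          PySem.Chars.upperChar (M.getD q ' ') else M.getD q ' ' := by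
    intro q hq
    rw [hN, efc_getD_mapIdx _ _ _ _ hq]
  apply efc_pass3_fix M N (by rw [hN]; simp)
  · intro q hq S hS
    rw [hNg q hq]
    by_cases hc : 2 ≤ q ∧ (q - 2) ∈ efcDropN efcEndList M
    · rw [if_pos hc]
      exact efc_upperChar_mem _ _ hS
    · rw [if_neg hc]
  · intro q hq
    rw [hNg q hq]
    have hiff : (2 ≤ q ∧ (q - 2) ∈ efcDropN efcEndList M)
        ↔ (2 ≤ q ∧ M.getD (q - 2) ' ' ∈ efcEndList) := by
      constructor
      · rintro ⟨ha, hb⟩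
        exact ⟨ha, ((efcDropN_mem _ _ _).mp hb).2.1⟩
      · rintro ⟨ha, hb⟩
        refine ⟨ha, (efcDropN_mem _ _ _).mpr ⟨by omega, hb, by omega⟩⟩
    by_cases hc : 2 ≤ q ∧ M.getD (q - 2) ' ' ∈ efcEndList
    · rw [if_pos (hiff.mpr hc), if_pos hc]
    · rw [if_neg (fun hx => hc (hiff.mp hx)), if_neg hc]
  · exact hM

-- ===== VERDICT (by name: the statement is the Claim_ definition above) =====
theorem english_format_checker_spec : Claim_equal_english_format_checker := by
  unfold Claim_equal_english_format_checker
  intro s hdom hpre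
  unfold Spec_english_format_checker
  rcases hpre with ⟨hne, hbad⟩
  cases hl : s.toList with
  | nil => exact absurd hl hne
  | cons c t =>
    unfold english_format_checker english_format_checker_alt
    rw [hl]
    dsimp only
    have hp1 : efcPass1 (PySem.Chars.upperChar c :: t) = efcInsS (PySem.Chars.upperChar c :: t) := by
      unfold efcPass1
      dsimp only
      rw [efcTrigIdx_eq, efcInsertBlanks_eq]
    rw [hp1]
    rw [hl] at hbad
    have hbad' : ¬ (2 ≤ (efcInsS (PySem.Chars.upperChar c :: t)).length ∧
        (efcInsS (PySem.Chars.upperChar c :: t)).getD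
          ((efcInsS (PySem.Chars.upperChar c :: t)).length - 2) ' ' ∈ efcSymList) := by
      rintro ⟨ha, hb⟩
      rcases efcInsS_no_sym _ ha hb with ⟨h1, h2, h3⟩
      apply hbad
      cases t with
      | nil => simp at h1
      | cons d t' =>
        refine ⟨by simp, ?_, ?_⟩
        · cases t' with
          | nil =>
            have hi1 : (PySem.Chars.upperChar c :: [d]).length - 2 = 0 := rfl
            have hi2 : (c :: [d]).length - 2 = 0 := rfl
            rw [hi1, List.getD_cons_zero] at h2
            rw [hi2, List.getD_cons_zero]
            exact (efc_upperChar_mem c efcSymList (Or.inl rfl)).mp h2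
          | cons e t'' =>
            have hi1 : (PySem.Chars.upperChar c :: d :: e :: t'').length - 2 = t''.length + 1 := by
              simp only [List.length_cons]; omega
            have hi2 : (c :: d :: e :: t'').length - 2 = t''.length + 1 := by
              simp only [List.length_cons]; omega
            rw [hi1, List.getD_cons_succ] at h2
            rw [hi2, List.getD_cons_succ]
            exact h2
        · rw [List.getLast?_cons_cons] at h3
          rw [List.getLast?_cons_cons]
          exact h3
    rw [efc_passes_eq _ hbad']
    rw [efcSpace_eq, efcFix_eq]
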